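-- pv_equiv track=rewrite | github.com/Soobinnni/python_code | ct/Python/프로그래머스/lv_0/옹알이1.py | find
-- ===== SOURCE A (Python) =====
-- from itertools import permutations
--
-- possible_bubbling = ["aya", "ye", "woo", "ma"]
--
-- def find(b):
-- 	if b in possible_bubbling:
-- 		return 1
-- 	if b in [w1+w2 for w1, w2 in permutations(possible_bubbling, 2)]:
-- 		return 1
-- 	if b in [w1+w2+w3 for w1, w2, w3 in permutations(possible_bubbling, 3)]:
-- 		return 1
-- 	if b in [w1+w2+w3+w4 for w1, w2, w3, w4 in permutations(possible_bubbling, 4)]: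
-- 		return 1
-- 	return 0
-- ===== SOURCE B (Python) =====
-- def find(b):
--     # Left-to-right greedy parse: the four words have distinct first letters
--     # and none is a prefix of another, so the matching word is unique.
--     def parse(s, u_aya, u_ye, u_woo, u_ma):
--         if s == "":
--             return True
--         if s.startswith("aya"):
--             return (not u_aya) and parse(s[3:], True, u_ye, u_woo, u_ma)
--         if s.startswith("ye"):
--             return (not u_ye) and parse(s[2:], u_aya, True, u_woo, u_ma)
--         if s.startswith("woo"):
--             return (not u_woo) and parse(s[3:], u_aya, u_ye, True, u_ma)
--         if s.startswith("ma"):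
--             return (not u_ma) and parse(s[2:], u_aya, u_ye, u_woo, True)
--         return False
--     return 1 if b != "" and parse(b, False, False, False, False) else 0
-- ===== Notes on version B (the rewrite author's own statement) =====
-- stated objective: simpler
-- what changed: Replaced membership tests against explicitly enumerated lists of all 2-, 3- and 4-word permutation concatenations by a single left-to-right greedy parse that tracks which words were already used.
import Mathlib
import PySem

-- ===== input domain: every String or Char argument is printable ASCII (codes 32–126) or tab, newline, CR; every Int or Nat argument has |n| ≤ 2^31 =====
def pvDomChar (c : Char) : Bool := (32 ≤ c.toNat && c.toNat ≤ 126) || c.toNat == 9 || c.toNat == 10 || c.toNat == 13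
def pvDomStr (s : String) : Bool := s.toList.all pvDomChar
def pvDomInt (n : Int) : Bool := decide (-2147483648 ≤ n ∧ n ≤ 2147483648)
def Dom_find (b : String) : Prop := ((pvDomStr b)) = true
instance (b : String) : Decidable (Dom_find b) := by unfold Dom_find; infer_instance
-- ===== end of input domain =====

-- B replaces A's enumeration of all 1..4-word permutation concatenations by a
-- left-to-right greedy parse tracking which words were already used (simpler).

-- ===== PORT A =====
def possible_bubbling : List String := ["aya", "ye", "woo", "ma"]

-- itertools.permutations(L, 2): pairs (L[i], L[j]), j ≠ i, in index order
def perm2 : List (String × String) :=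
  possible_bubbling.flatMap fun w1 =>
    (possible_bubbling.filter (· ≠ w1)).map fun w2 => (w1, w2)

def perm3 : List (String × String × String) :=
  possible_bubbling.flatMap fun w1 =>
    (possible_bubbling.filter (· ≠ w1)).flatMap fun w2 =>
      ((possible_bubbling.filter (· ≠ w1)).filter (· ≠ w2)).map fun w3 => (w1, w2, w3)

def perm4 : List (String × String × String × String) :=
  possible_bubbling.flatMap fun w1 =>
    (possible_bubbling.filter (· ≠ w1)).flatMap fun w2 =>
      ((possible_bubbling.filter (· ≠ w1)).filter (· ≠ w2)).flatMap fun w3 =>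
        (((possible_bubbling.filter (· ≠ w1)).filter (· ≠ w2)).filter (· ≠ w3)).map
          fun w4 => (w1, w2, w3, w4)

def find (b : String) : Int :=
  if possible_bubbling.contains b then 1
  else if (perm2.map fun p => p.1 ++ p.2).contains b then 1
  else if (perm3.map fun p => p.1 ++ p.2.1 ++ p.2.2).contains b then 1
  else if (perm4.map fun p => p.1 ++ p.2.1 ++ p.2.2.1 ++ p.2.2.2).contains b then 1
  else 0

-- ===== PORT B =====
-- the startswith tests of Source B become patterns on the character list
def parseB : List Char → Bool → Bool → Bool → Bool → Bool
  | [], _, _, _, _ => true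
  | 'a'::'y'::'a'::rest, u1, u2, u3, u4 => !u1 && parseB rest true u2 u3 u4
  | 'y'::'e'::rest, u1, u2, u3, u4 => !u2 && parseB rest u1 true u3 u4
  | 'w'::'o'::'o'::rest, u1, u2, u3, u4 => !u3 && parseB rest u1 u2 true u4
  | 'm'::'a'::rest, u1, u2, u3, u4 => !u4 && parseB rest u1 u2 u3 true
  | _, _, _, _, _ => false

def find_alt (b : String) : Int :=
  if b ≠ "" && parseB b.toList false false false false then 1 else 0

-- ===== PRECONDITION & SPEC =====
def Spec_find (b : String) (out : Int) : Prop := out = find_alt b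
instance (b : String) (out : Int) : Decidable (Spec_find b out) := by unfold Spec_find; infer_instance

-- ===== CLAIM (what is proved, stated in full; the proofs are below) =====
def Claim_equal_find : Prop := ∀ (b : String), Dom_find b → Spec_find b (find b)

-- ===== LEMMAS AND PROOFS =====

-- words still available given the four used-flags (as character lists)
def avail (u1 u2 u3 u4 : Bool) : List (List Char) :=
  (if u1 then [] else [['a','y','a']]) ++ (if u2 then [] else [['y','e']]) ++
  (if u3 then [] else [['w','o','o']]) ++ (if u4 then [] else [['m','a']])

-- all concatenations (including []) of nodup sequences drawn from ws, fuel-bounded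
def concatsAll : Nat → List (List Char) → List (List Char)
  | 0, _ => [[]]
  | n+1, ws => [] :: ws.flatMap fun w => (concatsAll n (ws.erase w)).map (w ++ ·)

lemma mem_concatsAll_step {w x : List Char} {ws : List (List Char)} {n : Nat}
    (hw : w ∈ ws) (hx : x ∈ concatsAll n (ws.erase w)) :
    (w ++ x) ∈ concatsAll (n+1) ws := by
  simp only [concatsAll, List.mem_cons, List.mem_flatMap, List.mem_map]
  exact Or.inr ⟨w, hw, x, hx, rfl⟩

lemma parseB_sound : ∀ (cs : List Char) (u1 u2 u3 u4 : Bool),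
    parseB cs u1 u2 u3 u4 = true →
    cs ∈ concatsAll (avail u1 u2 u3 u4).length (avail u1 u2 u3 u4) := by
  intro cs u1 u2 u3 u4 h
  induction cs, u1, u2, u3, u4 using parseB.induct with
  | case1 u1 u2 u3 u4 => cases u1 <;> cases u2 <;> cases u3 <;> cases u4 <;> decide
  | case2 rest u1 u2 u3 u4 ih =>
    simp only [parseB, Bool.and_eq_true, Bool.not_eq_true'] at h
    obtain ⟨h1, hp⟩ := h
    subst h1
    have hx := ih hp
    have hmem : ['a','y','a'] ∈ avail false u2 u3 u4 := by
      cases u2 <;> cases u3 <;> cases u4 <;> decide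
    have herase : (avail false u2 u3 u4).erase ['a','y','a'] = avail true u2 u3 u4 := by
      cases u2 <;> cases u3 <;> cases u4 <;> decide
    have hlen : (avail false u2 u3 u4).length = (avail true u2 u3 u4).length + 1 := by
      cases u2 <;> cases u3 <;> cases u4 <;> decide
    rw [hlen]
    exact mem_concatsAll_step hmem (herase ▸ hx)
  | case3 rest u1 u2 u3 u4 ih =>
    simp only [parseB, Bool.and_eq_true, Bool.not_eq_true'] at h
    obtain ⟨h1, hp⟩ := h
    subst h1
    have hx := ih hp
    have hmem : ['y','e'] ∈ avail u1 false u3 u4 := by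
      cases u1 <;> cases u3 <;> cases u4 <;> decide
    have herase : (avail u1 false u3 u4).erase ['y','e'] = avail u1 true u3 u4 := by
      cases u1 <;> cases u3 <;> cases u4 <;> decide
    have hlen : (avail u1 false u3 u4).length = (avail u1 true u3 u4).length + 1 := by
      cases u1 <;> cases u3 <;> cases u4 <;> decide
    rw [hlen]
    exact mem_concatsAll_step hmem (herase ▸ hx)
  | case4 rest u1 u2 u3 u4 ih =>
    simp only [parseB, Bool.and_eq_true, Bool.not_eq_true'] at h
    obtain ⟨h1, hp⟩ := h
    subst h1
    have hx := ih hp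
    have hmem : ['w','o','o'] ∈ avail u1 u2 false u4 := by
      cases u1 <;> cases u2 <;> cases u4 <;> decide
    have herase : (avail u1 u2 false u4).erase ['w','o','o'] = avail u1 u2 true u4 := by
      cases u1 <;> cases u2 <;> cases u4 <;> decide
    have hlen : (avail u1 u2 false u4).length = (avail u1 u2 true u4).length + 1 := by
      cases u1 <;> cases u2 <;> cases u4 <;> decide
    rw [hlen]
    exact mem_concatsAll_step hmem (herase ▸ hx)
  | case5 rest u1 u2 u3 u4 ih =>
    simp only [parseB, Bool.and_eq_true, Bool.not_eq_true'] at h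
    obtain ⟨h1, hp⟩ := h
    subst h1
    have hx := ih hp
    have hmem : ['m','a'] ∈ avail u1 u2 u3 false := by
      cases u1 <;> cases u2 <;> cases u3 <;> decide
    have herase : (avail u1 u2 u3 false).erase ['m','a'] = avail u1 u2 u3 true := by
      cases u1 <;> cases u2 <;> cases u3 <;> decide
    have hlen : (avail u1 u2 u3 false).length = (avail u1 u2 u3 true).length + 1 := by
      cases u1 <;> cases u2 <;> cases u3 <;> decide
    rw [hlen]
    exact mem_concatsAll_step hmem (herase ▸ hx)
  | case6 cs u1 u2 u3 u4 h1 h2 h3 h4 h5 =>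
    simp [parseB] at h

-- every nonempty concatenation of distinct words is accepted by A
lemma concats_in_find : ∀ cs ∈ concatsAll (avail false false false false).length
      (avail false false false false),
    cs = [] ∨ find (String.ofList cs) = 1 := by decide

-- every string A accepts is accepted by B
lemma B_of_A : ∀ (b : String), find b = 1 → find_alt b = 1 := by
  have h1 : ∀ s ∈ possible_bubbling, find_alt s = 1 := by decide
  have h2 : ∀ s ∈ (perm2.map fun p => p.1 ++ p.2), find_alt s = 1 := by decide
  have h3 : ∀ s ∈ (perm3.map fun p => p.1 ++ p.2.1 ++ p.2.2), find_alt s = 1 := by decide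
  have h4 : ∀ s ∈ (perm4.map fun p => p.1 ++ p.2.1 ++ p.2.2.1 ++ p.2.2.2),
      find_alt s = 1 := by decide
  intro b hb
  unfold find at hb
  split_ifs at hb with c1 c2 c3 c4
  · exact h1 b (by simpa using c1)
  · exact h2 b (by simpa using c2)
  · exact h3 b (by simpa using c3)
  · exact h4 b (by simpa using c4)
  · exact absurd hb (by decide)

lemma A_of_B : ∀ (b : String), find_alt b = 1 → find b = 1 := by
  intro b hb
  unfold find_alt at hb
  split_ifs at hb with c
  · simp only [Bool.and_eq_true, ne_eq, decide_eq_true_eq] at c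
    obtain ⟨hne, hp⟩ := c
    have hs := parseB_sound b.toList false false false false hp
    rcases concats_in_find b.toList hs with h | h
    · exact absurd (by simpa using congrArg String.ofList h) hne
    · simpa using h
  · exact absurd hb (by decide)

lemma find_vals (b : String) : find b = 0 ∨ find b = 1 := by
  unfold find; split_ifs <;> simp

lemma find_alt_vals (b : String) : find_alt b = 0 ∨ find_alt b = 1 := by
  unfold find_alt; split_ifs <;> simp

-- ===== VERDICT (by name: the statement is the Claim_ definition above) =====
theorem find_spec : Claim_equal_find := by
  intro b _
  unfold Spec_find
  rcases find_vals b with ha | ha <;> rcases find_alt_vals b with hb | hb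
  · rw [ha, hb]
  · have h := A_of_B b hb; rw [ha] at h; exact absurd h (by decide)
  · have h := B_of_A b ha; rw [hb] at h; exact absurd h (by decide)
  · rw [ha, hb]
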